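-- pv_equiv track=rewrite | github.com/nastyh/LeetCode | Basic Data Structures/Pluralize.py | pluralize_straigthforward
-- ===== SOURCE A (Python) =====
-- def pluralize_straigthforward(words):
--     res = []
--     d = {}
--     for word in words:
--         if word not in d:
--             d[word] = 1
--         else:
--             d[word] += 1
--     for k, v in d.items():
--         if v > 1:
--             res.append(k + 's')
--         else:
--             res.append(k)
--     return res
-- ===== SOURCE B (Python) =====
-- def pluralize_straigthforward(words):
--     seen = set()
--     res = []
--     for word in words:
--         if word not in seen:
--             seen.add(word)
--             res.append(word + 's' if words.count(word) > 1 else word)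
--     return res
-- ===== Notes on version B (the rewrite author's own statement) =====
-- stated objective: simpler
-- what changed: Replaces A's two-phase count-table-then-emit (dict of counts, then a second loop over items) with a single pass that emits at each first occurrence, deciding plurality by scanning the list with words.count(word) > 1.
import Mathlib
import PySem

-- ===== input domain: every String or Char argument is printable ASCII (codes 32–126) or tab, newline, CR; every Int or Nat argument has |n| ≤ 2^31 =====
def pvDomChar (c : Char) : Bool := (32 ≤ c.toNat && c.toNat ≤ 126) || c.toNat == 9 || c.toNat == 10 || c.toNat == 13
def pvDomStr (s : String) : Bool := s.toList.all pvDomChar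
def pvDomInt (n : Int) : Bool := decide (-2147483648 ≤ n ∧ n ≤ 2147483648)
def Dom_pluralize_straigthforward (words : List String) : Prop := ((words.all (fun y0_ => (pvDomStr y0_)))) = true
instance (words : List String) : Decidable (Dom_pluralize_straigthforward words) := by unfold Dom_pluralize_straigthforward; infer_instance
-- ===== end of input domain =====

-- B replaces A's count-dict-then-emit with a single pass emitting at each first occurrence,
-- deciding plurality by rescanning with words.count(word) > 1 (objective: simpler; not faster).

-- ===== PORT A =====
def pluralize_straigthforward (words : List String) : List String :=
  -- d = {}; for word in words: if word not in d: d[word] = 1 else: d[word] += 1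
  let d : PySem.Dict String Int :=
    words.foldl (fun d word =>
      if !(d.contains word) then d.insert word 1
      else d.insert word (d.getD word 0 + 1))   -- d[word] += 1 (read, guaranteed present, then write)
      PySem.Dict.empty
  -- for k, v in d.items(): res.append(k + 's') if v > 1 else res.append(k)
  d.items.foldl (fun res p => if p.2 > 1 then res ++ [p.1 ++ "s"] else res ++ [p.1]) []

-- ===== PORT B =====
def pluralize_straigthforward_alt (words : List String) : List String :=
  (words.foldl (fun st word =>
      if PySem.Set.contains st.1 word then st
      else (PySem.Set.add st.1 word,
            st.2 ++ [if words.count word > 1 then word ++ "s" else word]))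
    ((PySem.Set.empty : PySem.Set String), ([] : List String))).2

-- ===== PRECONDITION & SPEC =====
def Spec_pluralize_straigthforward (words : List String) (out : List String) : Prop := out = pluralize_straigthforward_alt words
instance (words : List String) (out : List String) : Decidable (Spec_pluralize_straigthforward words out) := by unfold Spec_pluralize_straigthforward; infer_instance

-- ===== CLAIM (what is proved, stated in full; the proofs are below) =====
def Claim_equal_pluralize_straigthforward : Prop := ∀ (words : List String), Dom_pluralize_straigthforward words → Spec_pluralize_straigthforward words (pluralize_straigthforward words)

-- ===== LEMMAS AND PROOFS =====

-- A's counting loop is Counter(words): in the fresh-key branch getD = 0, so both branches insert getD+1.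
theorem pvA_dict_eq_counter (words : List String) :
    words.foldl (fun d word =>
      if !(d.contains word) then d.insert word 1
      else d.insert word (d.getD word 0 + 1)) (PySem.Dict.empty : PySem.Dict String Int)
    = PySem.Dict.counter words := by
  rw [← PySem.Dict.foldl_insert_getD_add_one_eq_counter]
  congr 1
  funext d word
  by_cases h : d.contains word
  · simp [h]
  · simp [h, PySem.Dict.getD_of_not_contains d (0 : Int) (by simpa using h)]

-- B's loop invariant: the emitted suffix is the new (unseen) first occurrences, mapped.
theorem pvB_loop (f : String → String) (l : List String) (s : PySem.Set String) (res : List String) :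
    (l.foldl (fun st word =>
        if PySem.Set.contains st.1 word then st
        else (PySem.Set.add st.1 word, st.2 ++ [f word])) (s, res)).2
    = res ++ ((PySem.Set.ofList l).filter (fun y => !(PySem.Set.contains s y))).map f := by
  induction l generalizing s res with
  | nil => simp [PySem.Set.ofList_nil]
  | cons w l ih =>
    simp only [List.foldl_cons]
    by_cases h : PySem.Set.contains s w
    · rw [if_pos h, ih, PySem.Set.ofList_cons]
      congr 1
      rw [List.filter_cons]
      simp only [PySem.Set.contains_eq_listContains] at h ⊢
      simp only [h, Bool.not_true, Bool.false_eq_true, if_false, PySem.Set.discard,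
        List.filter_filter]
      apply congrArg
      apply List.filter_congr
      intro y _
      by_cases hy : y = w
      · subst hy; simp_all
      · simp [hy]
    · rw [if_neg h, ih, PySem.Set.ofList_cons]
      have hw : w ∉ s := by
        simpa [PySem.Set.contains_iff] using h
      rw [List.filter_cons]
      simp only [PySem.Set.contains_eq_listContains] at h ⊢
      simp only [h]
      simp only [Bool.not_false, if_true, List.map_cons, PySem.Set.discard, List.filter_filter,
        List.append_assoc, List.singleton_append]
      congr 2
      apply congrArg
      rw [PySem.Set.add_of_not_mem hw]
      apply List.filter_congr
      intro y _
      by_cases hy : y = w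
      · subst hy; simp
      · simp [hy]

-- ===== VERDICT (by name: the statement is the Claim_ definition above) =====
theorem pluralize_straigthforward_spec : Claim_equal_pluralize_straigthforward := by
  intro words _
  unfold Spec_pluralize_straigthforward pluralize_straigthforward pluralize_straigthforward_alt
  rw [pvA_dict_eq_counter, pvB_loop]
  have hstep : (fun (res : List String) (p : String × Int) =>
        if p.2 > 1 then res ++ [p.1 ++ "s"] else res ++ [p.1])
      = (fun res p => res ++ [if p.2 > 1 then p.1 ++ "s" else p.1]) := by
    funext res p
    by_cases h : p.2 > 1 <;> simp [h]
  rw [hstep, PySem.List.foldl_append_singleton_eq_map, PySem.Dict.items_counter]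
  simp only [PySem.Set.empty, List.nil_append, List.map_map]
  have hfil : ((PySem.Set.ofList words).filter
      (fun y => !(PySem.Set.contains ([] : PySem.Set String) y))) = PySem.Set.ofList words := by
    simp [PySem.Set.contains_eq_listContains]
  rw [hfil]
  apply List.map_congr_left
  intro w _
  simp only [Function.comp_apply]
  by_cases h : words.count w > 1
  · rw [if_pos (by exact_mod_cast h), if_pos h]
  · rw [if_neg (by exact_mod_cast h), if_neg h]
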